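-- pv_equiv track=rewrite | github.com/SiyankoMaks/PythonLabs | Лаб1/lab.py | maxSymbl
-- ===== SOURCE A (Python) =====
-- def maxSymbl(st, mx):
--     newKol = 1
--     for i in range(1, len(st)):
--         if st[i] == st[i-1]:
--             newKol += 1
--         else:
--             newKol = 1
--         if newKol == mx:
--             return st[i]
-- ===== SOURCE B (Python) =====
-- def maxSymbl(st, mx):
--     if mx < 1:
--         return None
--     i = 0
--     n = len(st)
--     while i < n:
--         j = i
--         while j < n and st[j] == st[i]:
--             j += 1
--         if j - i >= mx:
--             return st[i]
--         i = j
-- ===== Notes on version B (the rewrite author's own statement) =====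
-- stated objective: alternative
-- what changed: B scans maximal runs with two pointers and returns the first run of length >= mx, instead of A's per-character accumulator that starts at index 1; for mx == 1 on a non-empty string B returns the first character, which A's off-by-one never can.
-- intended difference: On mx == 1 with non-empty st, A skips index 0 and returns the first character differing from its predecessor (or None if all characters are equal), while B returns the first character, the intended answer since every character trivially forms a run of length 1. — e.g. on maxSymbl("ab", 1): A returns some "b", B returns some "a"
import Mathlib
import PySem

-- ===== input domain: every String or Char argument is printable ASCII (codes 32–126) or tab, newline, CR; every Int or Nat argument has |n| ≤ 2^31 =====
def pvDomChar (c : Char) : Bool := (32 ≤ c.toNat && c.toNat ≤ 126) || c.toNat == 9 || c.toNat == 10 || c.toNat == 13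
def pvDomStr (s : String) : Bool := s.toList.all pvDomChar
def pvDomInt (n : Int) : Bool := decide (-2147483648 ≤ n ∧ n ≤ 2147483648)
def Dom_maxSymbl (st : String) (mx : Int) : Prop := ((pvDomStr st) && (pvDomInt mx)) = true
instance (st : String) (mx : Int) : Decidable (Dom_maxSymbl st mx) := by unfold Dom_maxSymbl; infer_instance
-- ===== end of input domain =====

-- B replaces A's per-character accumulator with a two-pointer maximal-run scan; for mx == 1 on a
-- non-empty string A's loop (which starts at index 1) misses the first character, B returns it (D_ below).


-- ===== PORT A =====
-- A's loop over i in range(1, len st): keep the previous character and the accumulator newKol.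
def maxSymblA : List Char → Char → Int → Int → Option String
  | [], _, _, _ => none
  | c :: rest, prev, newKol, mx =>
    let k : Int := if c = prev then newKol + 1 else 1
    if k = mx then some (String.ofList [c]) else maxSymblA rest c k mx

def maxSymbl (st : String) (mx : Int) : Option String :=
  match st.toList with
  | [] => none
  | c :: rest => maxSymblA rest c 1 mx

-- ===== PORT B =====
-- length of the leading run of character c (Source B's inner while loop)
def runLenB : List Char → Char → Nat
  | [], _ => 0
  | x :: xs, c => if x = c then runLenB xs c + 1 else 0

-- Source B's outer while loop: test each maximal run in turn
def altLoop : List Char → Int → Option String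
  | [], _ => none
  | c :: rest, mx =>
    let L : Nat := runLenB rest c + 1
    if mx ≤ (L : Int) then some (String.ofList [c])
    else altLoop (rest.drop (runLenB rest c)) mx
termination_by cs _ => cs.length
decreasing_by
  simp only [List.length_cons, List.length_drop]
  omega

def maxSymbl_alt (st : String) (mx : Int) : Option String :=
  if mx < 1 then none else altLoop st.toList mx

-- ===== PRECONDITION & SPEC =====
-- On mx == 1 with non-empty st, A skips index 0 and returns the first character differing from its
-- predecessor (or none if all characters are equal), while B returns the first character, the intended
-- answer since every character trivially forms a run of length 1.
def D_maxSymbl (st : String) (mx : Int) : Prop := mx = 1 ∧ st ≠ ""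
instance (st : String) (mx : Int) : Decidable (D_maxSymbl st mx) := by unfold D_maxSymbl; infer_instance

def Spec_maxSymbl (st : String) (mx : Int) (out : Option String) : Prop := ¬ D_maxSymbl st mx → out = maxSymbl_alt st mx
instance (st : String) (mx : Int) (out : Option String) : Decidable (Spec_maxSymbl st mx out) := by unfold Spec_maxSymbl; infer_instance

def pvDiffWitness_maxSymbl : String × Int := ("ab", 1)
def pvDiffWitnessOut_maxSymbl : (Option String) × (Option String) := (some "b", some "a")

-- ===== CLAIM (what is proved, stated in full; the proofs are below) =====
def Claim_unchanged_maxSymbl : Prop := ∀ (st : String) (mx : Int), Dom_maxSymbl st mx → Spec_maxSymbl st mx (maxSymbl st mx)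
def Claim_changed_maxSymbl : Prop := Dom_maxSymbl (pvDiffWitness_maxSymbl.1) (pvDiffWitness_maxSymbl.2) ∧ D_maxSymbl (pvDiffWitness_maxSymbl.1) (pvDiffWitness_maxSymbl.2) ∧ maxSymbl (pvDiffWitness_maxSymbl.1) (pvDiffWitness_maxSymbl.2) = pvDiffWitnessOut_maxSymbl.1 ∧ maxSymbl_alt (pvDiffWitness_maxSymbl.1) (pvDiffWitness_maxSymbl.2) = pvDiffWitnessOut_maxSymbl.2 ∧ pvDiffWitnessOut_maxSymbl.1 ≠ pvDiffWitnessOut_maxSymbl.2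
def Claim_exact_maxSymbl : Prop := ∀ (st : String) (mx : Int), Dom_maxSymbl st mx → D_maxSymbl st mx → maxSymbl st mx ≠ maxSymbl_alt st mx

-- ===== LEMMAS AND PROOFS =====

-- the leading run of cs is (runLenB cs c) copies of c followed by the rest
theorem runLenB_decomp (cs : List Char) (c : Char) :
    cs = List.replicate (runLenB cs c) c ++ cs.drop (runLenB cs c) := by
  induction cs with
  | nil => rfl
  | cons x xs ih =>
    by_cases h : x = c
    · simp [runLenB, h, List.replicate_succ]
      exact (ih : _)
    · simp [runLenB, h]

theorem runLenB_drop_head (cs : List Char) (c d : Char) (rest : List Char)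
    (h : cs.drop (runLenB cs c) = d :: rest) : d ≠ c := by
  induction cs with
  | nil => simp [runLenB] at h
  | cons x xs ih =>
    by_cases hx : x = c
    · simp [runLenB, hx] at h
      exact ih h
    · simp [runLenB, hx] at h
      intro hd; exact hx (h.1 ▸ hd)

-- A's accumulator over a run of k copies of c: returns c iff mx is hit strictly inside (a, a+k]
theorem maxSymblA_replicate (k : Nat) (c : Char) (rest : List Char) (a mx : Int) :
    maxSymblA (List.replicate k c ++ rest) c a mx =
      if a < mx ∧ mx ≤ a + k then some (String.ofList [c])
      else maxSymblA rest c (a + k) mx := by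
  induction k generalizing a with
  | zero =>
    rw [if_neg (by push_cast; omega)]
    simp
  | succ n ih =>
    simp only [List.replicate_succ, List.cons_append, maxSymblA, if_pos trivial]
    rw [ih]
    have harith : a + 1 + (n : Int) = a + ((n + 1 : Nat) : Int) := by push_cast; ring
    split_ifs with h1 h2 h3 <;>
      first
        | rfl
        | (exact absurd harith (by push_cast at *; omega))
        | (rw [harith])

-- main agreement lemma for mx ≥ 2
theorem mainA (n : Nat) : ∀ (cs : List Char) (c : Char) (mx : Int), cs.length ≤ n → 2 ≤ mx →
    maxSymblA cs c 1 mx = altLoop (c :: cs) mx := by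
  induction n with
  | zero =>
    intro cs c mx hlen hmx
    have : cs = [] := List.eq_nil_of_length_eq_zero (Nat.le_zero.mp hlen)
    subst this
    simp [altLoop, runLenB, maxSymblA]
    omega
  | succ n ih =>
    intro cs c mx hlen hmx
    set k := runLenB cs c with hk
    have hdec := runLenB_decomp cs c
    rw [← hk] at hdec
    rw [altLoop]
    simp only [← hk]
    conv_lhs => rw [hdec]
    rw [maxSymblA_replicate]
    by_cases hhit : mx ≤ (k : Int) + 1
    · rw [if_pos ⟨by omega, by omega⟩, if_pos (by push_cast; omega)]
    · rw [if_neg (by omega), if_neg (by push_cast; omega)]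
      cases hrest : cs.drop k with
      | nil => simp [maxSymblA, altLoop]
      | cons d rest' =>
        have hd : d ≠ c := runLenB_drop_head cs c d rest' (hk ▸ hrest)
        rw [maxSymblA]
        have hne : ¬ ((if d = c then (1 : Int) + k + 1 else 1) = mx) := by
          simp [hd]; omega
        rw [if_neg hne]
        have hlen' : rest'.length ≤ n := by
          have h1 := congrArg List.length hrest
          simp [List.length_drop] at h1
          omega
        simpa [hd] using ih rest' d mx hlen' hmx

-- A never returns for mx < 1 (the accumulator is always ≥ 1)
theorem maxSymblA_neg (cs : List Char) (c : Char) (a mx : Int) (hmx : mx < 1) (ha : 1 ≤ a) :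
    maxSymblA cs c a mx = none := by
  induction cs generalizing c a with
  | nil => rfl
  | cons x xs ih =>
    rw [maxSymblA]
    have h1 : ¬ ((if x = c then a + 1 else 1) = mx) := by split_ifs with h <;> omega
    rw [if_neg h1]
    exact ih x _ (by split_ifs with h <;> omega)

-- with mx = 1, A can only return a character differing from the running previous char c
theorem maxSymblA_one (cs : List Char) (c : Char) (a : Int) (ha : 1 ≤ a) :
    maxSymblA cs c a 1 ≠ some (String.ofList [c]) := by
  induction cs generalizing c a with
  | nil => simp [maxSymblA]
  | cons x xs ih =>
    rw [maxSymblA]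
    by_cases hx : x = c
    · subst hx
      simp only [if_true]
      rw [if_neg (by omega : ¬ (a + 1 = (1 : Int)))]
      exact ih x (a + 1) (by omega)
    · simp only [if_neg hx, if_true]
      intro h
      have h2 := congrArg String.toList (Option.some.inj h)
      rw [String.toList_ofList, String.toList_ofList] at h2
      exact hx (List.head_eq_of_cons_eq h2)

-- ===== VERDICT (by name: the statement is the Claim_ definition above) =====
theorem toList_eq_nil (st : String) (h : st.toList = []) : st = "" := by
  have := congrArg String.ofList h
  simpa using this

theorem maxSymbl_spec : Claim_unchanged_maxSymbl := by
  intro st mx _ hnd2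
  rcases lt_trichotomy mx 1 with hmx | hmx | hmx
  · -- mx < 1: both none
    rw [maxSymbl_alt, if_pos hmx]
    cases h : st.toList with
    | nil => simp [maxSymbl, h]
    | cons c rest => simp [maxSymbl, h, maxSymblA_neg _ _ _ _ hmx le_rfl]
  · -- mx = 1: ¬ D forces st = ""
    have hst : st = "" := by
      by_contra hne
      exact hnd2 ⟨hmx, hne⟩
    subst hst; subst hmx
    simp [maxSymbl, maxSymbl_alt, altLoop]
  · -- mx ≥ 2
    rw [maxSymbl_alt, if_neg (by omega)]
    cases h : st.toList with
    | nil => simp [maxSymbl, h, altLoop]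
    | cons c rest =>
      simp only [maxSymbl, h]
      exact mainA rest.length rest c mx le_rfl (by omega)

theorem maxSymbl_changed : Claim_changed_maxSymbl := by
  unfold Claim_changed_maxSymbl
  refine ⟨by decide, by decide, rfl, ?_, by decide⟩
  show maxSymbl_alt "ab" 1 = some "a"
  rw [maxSymbl_alt, if_neg (by omega)]
  rw [show ("ab" : String).toList = ['a', 'b'] from rfl, altLoop]
  norm_num [runLenB]

theorem maxSymbl_tight : Claim_exact_maxSymbl := by
  intro st mx _ hd
  obtain ⟨hmx, hne⟩ := hd
  subst hmx
  cases h : st.toList with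
  | nil => exact absurd (toList_eq_nil st h) hne
  | cons c rest =>
    have hB : maxSymbl_alt st 1 = some (String.ofList [c]) := by
      rw [maxSymbl_alt, if_neg (by omega), h, altLoop]
      rw [if_pos (by push_cast; omega)]
    have hA : maxSymbl st 1 = maxSymblA rest c 1 1 := by simp [maxSymbl, h]
    rw [hA, hB]
    exact maxSymblA_one rest c 1 le_rfl
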